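-- pv_equiv track=rewrite | github.com/shenweihai1/leetcode | algs/balanced_parentheses.py | get_lf_unbalanced_by_stack
-- ===== SOURCE A (Python) =====
-- def get_lf_unbalanced_by_stack(A):
--     stack = []
--     for ch in A:
--         if ch == '(':
--             stack.append(ch)
--         elif ch == ')':
--             if stack and stack[-1] == '(':
--                 stack.pop()
--             else:
--                 stack.append(')')
--
--     return stack
-- ===== SOURCE B (Python) =====
-- def get_lf_unbalanced_by_stack(A):
--     s = ''.join(ch for ch in A if ch in '()')
--     while '()' in s:
--         s = s.replace('()', '')
--     return list(s)
-- ===== Notes on version B (the rewrite author's own statement) =====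
-- stated objective: alternative
-- what changed: Replaces the single-pass stack simulation by a fixed-point rewriting algorithm: filter out non-paren characters, then repeatedly delete every adjacent open-close pair until the string is irreducible, and return that residue; no matching state is maintained during any scan.
import Mathlib
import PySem

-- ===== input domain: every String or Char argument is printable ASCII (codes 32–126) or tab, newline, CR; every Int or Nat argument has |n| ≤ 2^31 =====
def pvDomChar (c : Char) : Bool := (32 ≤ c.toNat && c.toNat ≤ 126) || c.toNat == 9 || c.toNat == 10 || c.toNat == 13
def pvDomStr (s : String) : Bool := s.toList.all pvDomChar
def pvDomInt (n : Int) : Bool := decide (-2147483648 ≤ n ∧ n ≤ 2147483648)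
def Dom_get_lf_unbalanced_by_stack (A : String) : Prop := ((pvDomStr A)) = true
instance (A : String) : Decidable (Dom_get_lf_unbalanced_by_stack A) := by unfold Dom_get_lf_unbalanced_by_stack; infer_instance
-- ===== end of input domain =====

-- B replaces A's one-pass stack simulation by a fixed-point rewriting algorithm
-- (repeatedly delete every "()" substring until irreducible); objective: alternative.

-- ===== PORT A =====
def pvStepA (stack : List String) (ch : Char) : List String :=
  if ch = '(' then stack ++ ["("]
  else if ch = ')' then
    if stack ≠ [] ∧ PySem.List.pyGet? stack (-1) = some "(" then stack.dropLast
    else stack ++ [")"]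
  else stack

def get_lf_unbalanced_by_stack (A : String) : List String :=
  A.toList.foldl pvStepA []

-- ===== PORT B =====
-- ch in '()'
def pvIsParen (c : Char) : Bool := c = '(' || c = ')'

-- '()' in s  (substring test for the fixed 2-char pattern = some adjacent '(' ')')
def pvContainsPair : List Char → Bool
  | [] => false
  | [_] => false
  | a :: b :: rest => (a = '(' && b = ')') || pvContainsPair (b :: rest)

-- s.replace('()', ''): left-to-right non-overlapping removal of "()" in one pass
def pvRepl : List Char → List Char
  | [] => []
  | [c] => [c]
  | a :: b :: rest => if a = '(' ∧ b = ')' then pvRepl rest else a :: pvRepl (b :: rest)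

theorem pvRepl_len_le : ∀ s : List Char, (pvRepl s).length ≤ s.length
  | [] => by simp [pvRepl]
  | [c] => by simp [pvRepl]
  | a :: b :: rest => by
      simp only [pvRepl]
      split_ifs with h
      · have := pvRepl_len_le rest; simp; omega
      · have := pvRepl_len_le (b :: rest); simp at this ⊢; omega

theorem pvRepl_len_lt : ∀ s : List Char, pvContainsPair s = true → (pvRepl s).length < s.length
  | a :: b :: rest, h => by
      simp only [pvRepl]
      split_ifs with hp
      · have := pvRepl_len_le rest; simp; omega
      · have hrec : pvContainsPair (b :: rest) = true := by
          simp only [pvContainsPair, Bool.or_eq_true, Bool.and_eq_true, decide_eq_true_eq] at h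
          rcases h with ⟨h1, h2⟩ | h
          · exact absurd ⟨h1, h2⟩ hp
          · exact h
        have := pvRepl_len_lt (b :: rest) hrec
        simp at this ⊢; omega

-- the while loop: while '()' in s: s = s.replace('()', '')
def pvReduce (s : List Char) : List Char :=
  if h : pvContainsPair s = true then pvReduce (pvRepl s) else s
termination_by s.length
decreasing_by exact pvRepl_len_lt s h

def get_lf_unbalanced_by_stack_alt (A : String) : List String :=
  (pvReduce (A.toList.filter pvIsParen)).map (fun c => String.mk [c])

-- ===== PRECONDITION & SPEC =====
def Spec_get_lf_unbalanced_by_stack (A : String) (out : List String) : Prop := out = get_lf_unbalanced_by_stack_alt A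
instance (A : String) (out : List String) : Decidable (Spec_get_lf_unbalanced_by_stack A out) := by unfold Spec_get_lf_unbalanced_by_stack; infer_instance

-- ===== CLAIM (what is proved, stated in full; the proofs are below) =====
def Claim_equal_get_lf_unbalanced_by_stack : Prop := ∀ (A : String), Dom_get_lf_unbalanced_by_stack A → Spec_get_lf_unbalanced_by_stack A (get_lf_unbalanced_by_stack A)

-- ===== LEMMAS AND PROOFS =====

-- spec-level counter step: abstract state (#unmatched opens, #unmatched closes)
def chStep (st : Nat × Nat) (ch : Char) : Nat × Nat :=
  if ch = '(' then (st.1 + 1, st.2)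
  else if ch = ')' then
    if st.1 > 0 then (st.1 - 1, st.2) else (st.1, st.2 + 1)
  else st

-- invariant: A's stack is always replicate c ")" ++ replicate o "(" where (o, c) is the counter state
theorem pv_inv (cs : List Char) : ∀ (o c : Nat),
    List.foldl pvStepA (List.replicate c ")" ++ List.replicate o "(") cs =
      (fun st : Nat × Nat => List.replicate st.2 ")" ++ List.replicate st.1 "(")
        (List.foldl chStep (o, c) cs) := by
  induction cs with
  | nil => intro o c; rfl
  | cons ch cs ih =>
    intro o c
    simp only [List.foldl_cons]
    by_cases h1 : ch = '('
    · have hA : pvStepA (List.replicate c ")" ++ List.replicate o "(")  ch =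
          List.replicate c ")" ++ List.replicate (o+1) "(" := by
        simp [pvStepA, h1, List.replicate_succ']
      rw [hA]
      have hB : chStep (o, c) ch = (o+1, c) := by simp [chStep, h1]
      rw [hB, ih]
    · by_cases h2 : ch = ')'
      · cases o with
        | zero =>
          have hA : pvStepA (List.replicate c ")" ++ List.replicate 0 "(") ch =
              List.replicate (c+1) ")" ++ List.replicate 0 "(" := by
            cases c with
            | zero => simp [pvStepA, h1, h2]
            | succ c' =>
              have hlast : (List.replicate (c'+1) ")" ++ List.replicate 0 "(").getLast? = some ")" := by
                simp [List.replicate_succ', List.getLast?_concat]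
              simp [pvStepA, h1, h2, PySem.List.pyGet?_neg_one, hlast, List.replicate_succ']
          rw [hA]
          have hB : chStep (0, c) ch = (0, c+1) := by simp [chStep, h1, h2]
          rw [hB, ih]
        | succ o' =>
          have hA : pvStepA (List.replicate c ")" ++ List.replicate (o'+1) "(") ch =
              List.replicate c ")" ++ List.replicate o' "(" := by
            have hlast : (List.replicate c ")" ++ List.replicate (o'+1) "(").getLast? = some "(" := by
              rw [List.replicate_succ' (n := o'), ← List.append_assoc]
              simp [List.getLast?_concat]
            have hne : (List.replicate c ")" ++ List.replicate (o'+1) "(") ≠ [] := by simp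
            have hdrop : (List.replicate c ")" ++ List.replicate (o'+1) "(").dropLast =
                List.replicate c ")" ++ List.replicate o' "(" := by
              rw [List.replicate_succ' (n := o'), ← List.append_assoc]
              simp
            simp [pvStepA, h1, h2, PySem.List.pyGet?_neg_one, hlast, hne, hdrop]
          rw [hA]
          have hB : chStep (o'+1, c) ch = (o', c) := by simp [chStep, h1, h2]
          rw [hB, ih]
      · have hA : pvStepA (List.replicate c ")" ++ List.replicate o "(") ch =
            List.replicate c ")" ++ List.replicate o "(" := by simp [pvStepA, h1, h2]
        have hB : chStep (o, c) ch = (o, c) := by simp [chStep, h1, h2]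
        rw [hA, hB, ih]

-- removing non-paren chars does not change the counter fold
theorem chFold_filter (cs : List Char) : ∀ st : Nat × Nat,
    List.foldl chStep st (cs.filter pvIsParen) = List.foldl chStep st cs := by
  induction cs with
  | nil => intro st; rfl
  | cons c cs ih =>
    intro st
    by_cases h : pvIsParen c = true
    · simp [List.filter_cons, h, ih]
    · have hstep : chStep st c = st := by
        simp [pvIsParen, Bool.or_eq_true, decide_eq_true_eq] at h
        push_neg at h
        simp [chStep, h.1, h.2]
      simp [List.filter_cons, h, hstep, ih]

-- one replace pass preserves the counter fold
theorem chFold_repl : ∀ (s : List Char) (st : Nat × Nat),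
    List.foldl chStep st (pvRepl s) = List.foldl chStep st s
  | [], _ => rfl
  | [c], _ => rfl
  | a :: b :: rest, st => by
      simp only [pvRepl]
      split_ifs with h
      · obtain ⟨ha, hb⟩ := h
        subst ha; subst hb
        have : chStep (chStep st '(') ')' = st := by
          cases st with
          | mk o c => simp [chStep]
        simp only [List.foldl_cons, this]
        exact chFold_repl rest st
      · simp only [List.foldl_cons]
        exact chFold_repl (b :: rest) (chStep st a)

-- the whole reduction loop preserves the counter fold
theorem chFold_reduce (s : List Char) (st : Nat × Nat) :
    List.foldl chStep st (pvReduce s) = List.foldl chStep st s := by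
  rw [pvReduce]
  split_ifs with h
  · rw [chFold_reduce (pvRepl s) st, chFold_repl]
  · rfl
termination_by s.length
decreasing_by exact pvRepl_len_lt s h

-- the reduction result contains no "()"
theorem reduce_no_pair (s : List Char) : pvContainsPair (pvReduce s) = false := by
  rw [pvReduce]
  split_ifs with h
  · exact reduce_no_pair (pvRepl s)
  · simpa using h
termination_by s.length
decreasing_by exact pvRepl_len_lt s h

theorem repl_parens : ∀ s : List Char, s.all pvIsParen = true → (pvRepl s).all pvIsParen = true
  | [], h => h
  | [c], h => h
  | a :: b :: rest, h => by
      simp only [List.all_cons, Bool.and_eq_true] at h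
      simp only [pvRepl]
      split_ifs with hp
      · exact repl_parens rest h.2.2
      · simp only [List.all_cons, Bool.and_eq_true]
        exact ⟨h.1, repl_parens (b :: rest) (by simp [List.all_cons, h.2.1, h.2.2])⟩

theorem reduce_parens (s : List Char) (h : s.all pvIsParen = true) :
    (pvReduce s).all pvIsParen = true := by
  rw [pvReduce]
  split_ifs with hc
  · exact reduce_parens (pvRepl s) (repl_parens s h)
  · exact h
termination_by s.length
decreasing_by exact pvRepl_len_lt s hc

-- a paren-only list without adjacent "()" is some ")"^c ++ "("^o
theorem nf : ∀ s : List Char, s.all pvIsParen = true → pvContainsPair s = false →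
    ∃ c o : Nat, s = List.replicate c ')' ++ List.replicate o '('
  | [], _, _ => ⟨0, 0, rfl⟩
  | [a], h, _ => by
      simp only [List.all_cons, List.all_nil, Bool.and_true, pvIsParen,
        Bool.or_eq_true, decide_eq_true_eq] at h
      rcases h with h | h
      · exact ⟨0, 1, by simp [h]⟩
      · exact ⟨1, 0, by simp [h]⟩
  | a :: b :: rest, h, hp => by
      simp only [pvContainsPair, Bool.or_eq_false_iff, Bool.and_eq_false_iff] at hp
      obtain ⟨hab, htail⟩ := hp
      simp only [List.all_cons, Bool.and_eq_true] at h
      obtain ⟨c, o, heq⟩ := nf (b :: rest) (by simp [List.all_cons, h.2.1, h.2.2]) htail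
      have ha : a = '(' ∨ a = ')' := by
        have := h.1; simpa [pvIsParen, Bool.or_eq_true, decide_eq_true_eq] using this
      rcases ha with ha | ha
      · -- a = '(' so b ≠ ')', hence b = '(' and c = 0
        have hb : b = '(' := by
          have hbp := h.2.1
          simp [pvIsParen, Bool.or_eq_true, decide_eq_true_eq] at hbp
          rcases hbp with hb | hb
          · exact hb
          · exfalso
            rcases hab with hA | hB
            · simp [ha] at hA
            · simp [hb] at hB
        have hc0 : c = 0 := by
          cases c with
          | zero => rfl
          | succ c' =>
            exfalso
            have : b = ')' := by
              have := congrArg (fun l => l.head?) heq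
              simpa [List.replicate_succ] using this
            simp [hb] at this
        subst hc0
        refine ⟨0, o + 1, ?_⟩
        simp only [List.replicate, List.nil_append] at heq ⊢
        rw [ha, heq]
      · refine ⟨c + 1, o, ?_⟩
        rw [ha, heq]
        simp [List.replicate_succ]

-- counter fold over ")"^c from an o = 0 state
theorem fold_closes : ∀ (c k : Nat),
    List.foldl chStep (0, k) (List.replicate c ')') = (0, k + c)
  | 0, k => by simp
  | c + 1, k => by
      simp only [List.replicate_succ, List.foldl_cons]
      have : chStep (0, k) ')' = (0, k + 1) := by simp [chStep]
      rw [this, fold_closes c (k + 1)]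
      have h2 : k + 1 + c = k + (c + 1) := by omega
      rw [h2]

-- counter fold over "("^o
theorem fold_opens : ∀ (o o' c : Nat),
    List.foldl chStep (o', c) (List.replicate o '(') = (o' + o, c)
  | 0, o', c => by simp
  | o + 1, o', c => by
      simp only [List.replicate_succ, List.foldl_cons]
      have : chStep (o', c) '(' = (o' + 1, c) := by simp [chStep]
      rw [this, fold_opens o (o' + 1) c]
      have h2 : o' + 1 + o = o' + (o + 1) := by omega
      rw [h2]

theorem fold_nf (c o : Nat) :
    List.foldl chStep (0, 0) (List.replicate c ')' ++ List.replicate o '(') = (o, c) := by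
  rw [List.foldl_append, fold_closes c 0, fold_opens o 0 (0 + c)]
  simp

-- ===== VERDICT (by name: the statement is the Claim_ definition above) =====
theorem get_lf_unbalanced_by_stack_spec : Claim_equal_get_lf_unbalanced_by_stack := by
  intro A _
  unfold Spec_get_lf_unbalanced_by_stack get_lf_unbalanced_by_stack get_lf_unbalanced_by_stack_alt
  -- A's side equals the stringified counter fold
  have hA := pv_inv A.toList 0 0
  simp only [List.replicate, List.append_nil, List.nil_append] at hA
  rw [hA]
  -- B's side: normal form of the reduction
  set r := pvReduce (A.toList.filter pvIsParen) with hr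
  obtain ⟨c, o, hnf⟩ := nf r
    (reduce_parens _ (by simp [List.all_filter]))
    (reduce_no_pair _)
  -- the counter fold over A.toList equals (o, c)
  have hfold : List.foldl chStep (0, 0) A.toList = (o, c) := by
    rw [← chFold_filter, ← chFold_reduce (A.toList.filter pvIsParen) (0, 0), ← hr, hnf,
      fold_nf]
  rw [hfold, hnf]
  simp only [List.map_append, List.map_replicate]
  rfl
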